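-- pv_equiv track=rewrite | github.com/Ankushwalia07/Data_Engineer | Scrapping/validation.py | validate_lechocolat
-- ===== SOURCE A (Python) =====
-- def validate_lechocolat(data):
--     errors = []
--     # Add validation rules specific to lechocolat-alainducasse.com
--     for product in data:
--         # Check if each product has a name, price, image URL, and consume advice
--         if 'name' not in product:
--             errors.append("Title is missing for product: {}".format(product.get('price', 'Unknown')))
--         if 'price' not in product:
--             errors.append("Price is missing for product: {}".format(product.get('name', 'Unknown')))
--         if 'image_url' not in product:
--             errors.append("Image URL is missing for product: {}".format(product.get('name', 'Unknown')))
--         if 'consume_advice' not in product: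
--             errors.append("Consume advice is missing for product: {}".format(product.get('name', 'Unknown')))
--         # Additional checks for weight and allergens
--         if 'weight' not in product:
--             errors.append("Weight is missing for product: {}".format(product.get('name', 'Unknown')))
--         if 'allergens' not in product:
--             errors.append("Allergens information is missing for product: {}".format(product.get('name', 'Unknown')))
--     return errors
-- ===== SOURCE B (Python) =====
-- def validate_lechocolat(data):
--     # Column-wise strategy: one pass over ALL products per rule, producing a
--     # column of Optional messages; then transpose (zip) the six columns so the
--     # output comes out product-major, matching the original ordering.
--     def column(field, template, default_key):
--         return [None if field in p else template.format(p.get(default_key, 'Unknown'))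
--                 for p in data]
--
--     titles   = column('name',           'Title is missing for product: {}', 'price')
--     prices   = column('price',          'Price is missing for product: {}', 'name')
--     images   = column('image_url',      'Image URL is missing for product: {}', 'name')
--     advices  = column('consume_advice', 'Consume advice is missing for product: {}', 'name')
--     weights  = column('weight',         'Weight is missing for product: {}', 'name')
--     allergs  = column('allergens',      'Allergens information is missing for product: {}', 'name')
--
--     errors = []
--     for row in zip(titles, prices, images, advices, weights, allergs):
--         errors.extend(m for m in row if m is not None)
--     return errors
-- ===== Notes on version B (the rewrite author's own statement) =====
-- stated objective: alternative
-- what changed: Instead of A's single product-major pass with six inline if/append branches, B makes six rule-major passes producing columns of optional messages and then transposes (zips) the columns row-wise, flattening each row to recover the product-major output order.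
import Mathlib
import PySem

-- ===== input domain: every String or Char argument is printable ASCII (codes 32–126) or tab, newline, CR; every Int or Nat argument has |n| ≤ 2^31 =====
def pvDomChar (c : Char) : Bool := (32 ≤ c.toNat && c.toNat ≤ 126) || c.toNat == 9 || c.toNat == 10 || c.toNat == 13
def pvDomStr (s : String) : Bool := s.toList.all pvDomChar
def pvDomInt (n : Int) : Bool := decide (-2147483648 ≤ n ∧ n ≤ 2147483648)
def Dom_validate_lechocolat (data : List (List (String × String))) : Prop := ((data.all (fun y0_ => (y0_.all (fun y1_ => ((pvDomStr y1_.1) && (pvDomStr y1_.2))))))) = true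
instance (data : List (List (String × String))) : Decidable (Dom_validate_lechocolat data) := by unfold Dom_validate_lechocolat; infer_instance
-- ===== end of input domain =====

-- B computes the messages column-wise (one pass over all products per rule, six
-- columns of optional messages) and transposes the columns row-wise to recover
-- A's product-major order (objective: alternative; same cost, different traversal).


-- ===== PORT A =====
-- literal port: one pass over products, six sequential if/append branches
def validate_lechocolat (data : List (List (String × String))) : List String :=
  data.foldl (fun errors product =>
    let d := PySem.Dict.ofList product
    let errors := if !(d.contains "name") then
        errors ++ ["Title is missing for product: " ++ d.getD "price" "Unknown"] else errors
    let errors := if !(d.contains "price") then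
        errors ++ ["Price is missing for product: " ++ d.getD "name" "Unknown"] else errors
    let errors := if !(d.contains "image_url") then
        errors ++ ["Image URL is missing for product: " ++ d.getD "name" "Unknown"] else errors
    let errors := if !(d.contains "consume_advice") then
        errors ++ ["Consume advice is missing for product: " ++ d.getD "name" "Unknown"] else errors
    let errors := if !(d.contains "weight") then
        errors ++ ["Weight is missing for product: " ++ d.getD "name" "Unknown"] else errors
    let errors := if !(d.contains "allergens") then
        errors ++ ["Allergens information is missing for product: " ++ d.getD "name" "Unknown"] else errors
    errors) []

-- ===== PORT B =====
-- one rule-major pass: the column of optional messages for one rule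
def lechocolatColumn (field tmpl defaultKey : String)
    (data : List (List (String × String))) : List (Option String) :=
  data.map (fun p =>
    let d := PySem.Dict.ofList p
    if d.contains field then none else some (tmpl ++ d.getD defaultKey "Unknown"))

-- zip of the six columns (Python's zip truncates at the shortest list)
def lechocolatZip6 : List (Option String) → List (Option String) → List (Option String) →
    List (Option String) → List (Option String) → List (Option String) →
    List (List (Option String))
  | x0 :: a, x1 :: b, x2 :: c, x3 :: d, x4 :: e, x5 :: f =>
      [x0, x1, x2, x3, x4, x5] :: lechocolatZip6 a b c d e f
  | _, _, _, _, _, _ => []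

def validate_lechocolat_alt (data : List (List (String × String))) : List String :=
  let titles  := lechocolatColumn "name" "Title is missing for product: " "price" data
  let prices  := lechocolatColumn "price" "Price is missing for product: " "name" data
  let images  := lechocolatColumn "image_url" "Image URL is missing for product: " "name" data
  let advices := lechocolatColumn "consume_advice" "Consume advice is missing for product: " "name" data
  let weights := lechocolatColumn "weight" "Weight is missing for product: " "name" data
  let allergs := lechocolatColumn "allergens" "Allergens information is missing for product: " "name" data
  (lechocolatZip6 titles prices images advices weights allergs).foldl
    (fun errors row => errors ++ row.filterMap id) []

-- ===== PRECONDITION & SPEC =====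
def Spec_validate_lechocolat (data : List (List (String × String))) (out : List String) : Prop := out = validate_lechocolat_alt data
instance (data : List (List (String × String))) (out : List String) : Decidable (Spec_validate_lechocolat data out) := by unfold Spec_validate_lechocolat; infer_instance

-- ===== CLAIM (what is proved, stated in full; the proofs are below) =====
def Claim_equal_validate_lechocolat : Prop := ∀ (data : List (List (String × String))), Dom_validate_lechocolat data → Spec_validate_lechocolat data (validate_lechocolat data)

-- ===== LEMMAS AND PROOFS =====

-- the six per-product optional messages, in rule order
def lechocolatRow (product : List (String × String)) : List (Option String) :=
  let d := PySem.Dict.ofList product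
  [ if d.contains "name" then none else some ("Title is missing for product: " ++ d.getD "price" "Unknown"),
    if d.contains "price" then none else some ("Price is missing for product: " ++ d.getD "name" "Unknown"),
    if d.contains "image_url" then none else some ("Image URL is missing for product: " ++ d.getD "name" "Unknown"),
    if d.contains "consume_advice" then none else some ("Consume advice is missing for product: " ++ d.getD "name" "Unknown"),
    if d.contains "weight" then none else some ("Weight is missing for product: " ++ d.getD "name" "Unknown"),
    if d.contains "allergens" then none else some ("Allergens information is missing for product: " ++ d.getD "name" "Unknown") ]

-- zipping the six columns of `data` yields the per-product rows
theorem lechocolat_zip_columns (data : List (List (String × String))) :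
    lechocolatZip6
      (lechocolatColumn "name" "Title is missing for product: " "price" data)
      (lechocolatColumn "price" "Price is missing for product: " "name" data)
      (lechocolatColumn "image_url" "Image URL is missing for product: " "name" data)
      (lechocolatColumn "consume_advice" "Consume advice is missing for product: " "name" data)
      (lechocolatColumn "weight" "Weight is missing for product: " "name" data)
      (lechocolatColumn "allergens" "Allergens information is missing for product: " "name" data)
      = data.map lechocolatRow := by
  induction data with
  | nil => rfl
  | cons p t ih =>
      simp only [lechocolatColumn, List.map_cons] at *
      rw [lechocolatZip6, ih]
      rfl

-- A's per-product step appends exactly the filtered row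
theorem lechocolat_step_eq (errors : List String) (product : List (String × String)) :
    (let d := PySem.Dict.ofList product
    let errors := if !(d.contains "name") then
        errors ++ ["Title is missing for product: " ++ d.getD "price" "Unknown"] else errors
    let errors := if !(d.contains "price") then
        errors ++ ["Price is missing for product: " ++ d.getD "name" "Unknown"] else errors
    let errors := if !(d.contains "image_url") then
        errors ++ ["Image URL is missing for product: " ++ d.getD "name" "Unknown"] else errors
    let errors := if !(d.contains "consume_advice") then
        errors ++ ["Consume advice is missing for product: " ++ d.getD "name" "Unknown"] else errors
    let errors := if !(d.contains "weight") then
        errors ++ ["Weight is missing for product: " ++ d.getD "name" "Unknown"] else errors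
    let errors := if !(d.contains "allergens") then
        errors ++ ["Allergens information is missing for product: " ++ d.getD "name" "Unknown"] else errors
    errors) = errors ++ (lechocolatRow product).filterMap id := by
  simp only [lechocolatRow]
  cases (PySem.Dict.ofList product).contains "name" <;>
    cases (PySem.Dict.ofList product).contains "price" <;>
      cases (PySem.Dict.ofList product).contains "image_url" <;>
        cases (PySem.Dict.ofList product).contains "consume_advice" <;>
          cases (PySem.Dict.ofList product).contains "weight" <;>
            cases (PySem.Dict.ofList product).contains "allergens" <;>
              simp [List.filterMap]

-- both sides, generalized over the accumulator
theorem lechocolat_foldl_eq (data : List (List (String × String))) : ∀ (errors : List String),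
    data.foldl (fun errors product =>
      let d := PySem.Dict.ofList product
      let errors := if !(d.contains "name") then
          errors ++ ["Title is missing for product: " ++ d.getD "price" "Unknown"] else errors
      let errors := if !(d.contains "price") then
          errors ++ ["Price is missing for product: " ++ d.getD "name" "Unknown"] else errors
      let errors := if !(d.contains "image_url") then
          errors ++ ["Image URL is missing for product: " ++ d.getD "name" "Unknown"] else errors
      let errors := if !(d.contains "consume_advice") then
          errors ++ ["Consume advice is missing for product: " ++ d.getD "name" "Unknown"] else errors
      let errors := if !(d.contains "weight") then
          errors ++ ["Weight is missing for product: " ++ d.getD "name" "Unknown"] else errors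
      let errors := if !(d.contains "allergens") then
          errors ++ ["Allergens information is missing for product: " ++ d.getD "name" "Unknown"] else errors
      errors) errors
    = (data.map lechocolatRow).foldl (fun errors row => errors ++ row.filterMap id) errors := by
  induction data with
  | nil => intro errors; rfl
  | cons p t ih =>
      intro errors
      rw [List.foldl_cons, lechocolat_step_eq, List.map_cons, List.foldl_cons, ih]

-- ===== VERDICT (by name: the statement is the Claim_ definition above) =====
theorem validate_lechocolat_spec : Claim_equal_validate_lechocolat := by
  intro data _
  show validate_lechocolat data = validate_lechocolat_alt data
  unfold validate_lechocolat validate_lechocolat_alt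
  simp only [lechocolat_foldl_eq, lechocolat_zip_columns]
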